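-- pv_equiv track=rewrite | github.com/FrancoARossi/SySdL-TPs | pruebas.py | a_ErrorSimbInvalido
-- ===== SOURCE A (Python) =====
-- SimbolosDeLaGramatica = [':=', '<', '>', '>=', '<=', '!=', '==', '(', ')', '{', '}', ',', '+', '*', '-', '/']
--
-- def a_ErrorSimbInvalido (word):
-- 	s = 0
-- 	for c in word:
-- 		if s == 0 and (not c in SimbolosDeLaGramatica and not c.isalpha() and not c.isdigit()):
-- 			s = 1
-- 		elif s == 1 and (not c in SimbolosDeLaGramatica and not c.isalpha() and not c.isdigit()):
-- 			break
-- 		else: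
-- 			s = -1
-- 			break
-- 	return (s == 1)
-- ===== SOURCE B (Python) =====
-- SimbolosDeLaGramatica = [':=', '<', '>', '>=', '<=', '!=', '==', '(', ')', '{', '}', ',', '+', '*', '-', '/']
--
-- def _invalid(c):
--     return c not in SimbolosDeLaGramatica and not c.isalpha() and not c.isdigit()
--
-- def a_ErrorSimbInvalido(word):
--     if not word:
--         return False
--     if not _invalid(word[0]):
--         return False
--     if len(word) >= 2 and not _invalid(word[1]):
--         return False
--     return True
-- ===== Notes on version B (the rewrite author's own statement) =====
-- stated objective: simpler
-- what changed: Replaced the state-machine loop over the whole word by direct inspection of only the first two characters (all the loop can ever reach before breaking), via an invalid-character helper and early returns.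
import Mathlib
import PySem

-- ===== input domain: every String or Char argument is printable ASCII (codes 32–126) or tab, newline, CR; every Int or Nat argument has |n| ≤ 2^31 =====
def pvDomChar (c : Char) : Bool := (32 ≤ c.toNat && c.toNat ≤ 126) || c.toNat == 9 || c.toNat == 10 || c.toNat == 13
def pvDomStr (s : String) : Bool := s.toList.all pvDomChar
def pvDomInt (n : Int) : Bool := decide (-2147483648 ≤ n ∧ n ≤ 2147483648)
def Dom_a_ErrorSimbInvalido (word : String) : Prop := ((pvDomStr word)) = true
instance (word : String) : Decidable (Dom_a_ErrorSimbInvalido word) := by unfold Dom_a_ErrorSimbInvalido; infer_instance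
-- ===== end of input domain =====

-- B replaces A's state-machine loop by a direct inspection of the first two characters (objective: simpler).

-- ===== PORT A =====
def SimbolosDeLaGramatica : List String :=
  [":=", "<", ">", ">=", "<=", "!=", "==", "(", ")", "{", "}", ",", "+", "*", "-", "/"]

-- the loop body's test: not c in SimbolosDeLaGramatica and not c.isalpha() and not c.isdigit()
-- (c is a one-character string in Python; membership compares it with each symbol)
def aInvTest (c : Char) : Bool :=
  !(SimbolosDeLaGramatica.contains (String.ofList [c])) && !(PySem.Chars.isalpha c) && !(PySem.Chars.isdigit c)

-- the for-loop with its breaks, state s carried; break returns the current s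
def aLoop : List Char → Int → Int
  | [], s => s
  | c :: rest, s =>
    if s == 0 && aInvTest c then aLoop rest 1
    else if s == 1 && aInvTest c then s          -- break
    else -1                                      -- s = -1; break

def a_ErrorSimbInvalido (word : String) : Bool :=
  (aLoop word.toList 0) == 1

-- ===== PORT B =====
def bInvalid (c : Char) : Bool :=
  !(SimbolosDeLaGramatica.contains (String.ofList [c])) && !(PySem.Chars.isalpha c) && !(PySem.Chars.isdigit c)

def a_ErrorSimbInvalido_alt (word : String) : Bool :=
  match word.toList with
  | [] => false
  | [c] => bInvalid c
  | c :: d :: _ => bInvalid c && bInvalid d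

-- ===== PRECONDITION & SPEC =====
def Spec_a_ErrorSimbInvalido (word : String) (out : Bool) : Prop := out = a_ErrorSimbInvalido_alt word
instance (word : String) (out : Bool) : Decidable (Spec_a_ErrorSimbInvalido word out) := by unfold Spec_a_ErrorSimbInvalido; infer_instance

-- ===== CLAIM (what is proved, stated in full; the proofs are below) =====
def Claim_equal_a_ErrorSimbInvalido : Prop := ∀ (word : String), Dom_a_ErrorSimbInvalido word → Spec_a_ErrorSimbInvalido word (a_ErrorSimbInvalido word)

-- ===== LEMMAS AND PROOFS =====
theorem aLoop_one (l : List Char) : (aLoop l 1 == 1) = (match l with | [] => true | d :: _ => aInvTest d) := by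
  cases l with
  | nil => simp [aLoop]
  | cons d rest =>
    simp only [aLoop]
    by_cases h : aInvTest d <;> simp [h]

-- ===== VERDICT (by name: the statement is the Claim_ definition above) =====
theorem a_ErrorSimbInvalido_spec : Claim_equal_a_ErrorSimbInvalido := by
  intro word _
  unfold Spec_a_ErrorSimbInvalido a_ErrorSimbInvalido a_ErrorSimbInvalido_alt
  cases h : word.toList with
  | nil => simp [aLoop]
  | cons c rest =>
    simp only [aLoop]
    by_cases hc : aInvTest c
    · simp only [hc, Bool.and_true, beq_self_eq_true, if_pos]
      rw [show aInvTest c = bInvalid c from rfl] at hc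
      cases rest with
      | nil => simp [aLoop, hc]
      | cons d rest' =>
        have := aLoop_one (d :: rest')
        simp only [aLoop] at this ⊢
        by_cases hd : aInvTest d <;>
          simp_all [bInvalid, aInvTest]
    · have : ¬ ((0 : Int) == 0 && aInvTest c) = true := by simp [hc]
      simp only [if_neg this]
      have h1 : ¬ ((0 : Int) == 1 && aInvTest c) = true := by simp [hc]
      simp only [if_neg h1]
      rw [show aInvTest c = bInvalid c from rfl] at hc
      cases rest <;> simp_all
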